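-- pv_equiv track=rewrite | github.com/Tejas07PSK/lb_dsa_cracker | Tries/Print unique rows in a given boolean matrix/solution.py | uniqueRow
-- ===== SOURCE A (Python) =====
-- class TrieNode:
--     def __init__ (self):
--         self.children = {}
--         self.is_end = False
--
-- def uniqueRow (row, col, matrix):
--     root, res = TrieNode(), []
--     matrix = [[matrix[j] for j in range(i, i + col)] for i in range(0, len(matrix), col)]
--     for row in matrix:
--         ptr = root
--         for item in row:
--             if (item not in ptr.children): ptr.children[item] = TrieNode()
--             ptr = ptr.children[item]
--         if (not ptr.is_end):
--             res.append(row)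
--             ptr.is_end = True
--     return res
-- ===== SOURCE B (Python) =====
-- def uniqueRow(row, col, matrix):
--     seen, res = set(), []
--     for i in range(0, len(matrix), col):
--         r = matrix[i:i + col]
--         key = tuple(r)
--         if key not in seen:
--             seen.add(key)
--             res.append(r)
--     return res
-- ===== Notes on version B (the rewrite author's own statement) =====
-- stated objective: simpler
-- what changed: Replaces A's mutable trie walk over element-by-element rebuilt rows with a single pass that slices each row out of the flat list and dedups via a set of row tuples.
import Mathlib
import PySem

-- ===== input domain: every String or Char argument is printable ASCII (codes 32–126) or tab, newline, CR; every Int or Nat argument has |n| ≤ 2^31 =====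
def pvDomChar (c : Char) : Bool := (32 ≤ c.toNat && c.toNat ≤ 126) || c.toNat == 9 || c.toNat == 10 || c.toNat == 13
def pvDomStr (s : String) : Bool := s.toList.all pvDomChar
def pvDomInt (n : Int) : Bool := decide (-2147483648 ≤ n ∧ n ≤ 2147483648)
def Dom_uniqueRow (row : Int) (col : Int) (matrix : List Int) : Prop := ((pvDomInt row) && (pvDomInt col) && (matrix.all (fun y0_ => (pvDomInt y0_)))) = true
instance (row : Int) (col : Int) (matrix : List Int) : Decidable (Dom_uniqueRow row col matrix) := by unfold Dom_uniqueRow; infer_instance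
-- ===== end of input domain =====

-- B replaces A's mutable trie walk over element-by-element rebuilt rows with one pass
-- that slices each row out of the flat list and dedups via a set of row keys (objective: simpler).

-- ===== PORT A =====
-- A's TrieNode (children dict + is_end flag); the nested children dict is encoded as an
-- explicit mutual association structure (nested inductives are not allowed).
mutual
inductive PvTrie where
  | mk : Bool → PvChildren → PvTrie
  deriving DecidableEq
inductive PvChildren where
  | nil : PvChildren
  | cons : Int → PvTrie → PvChildren → PvChildren
  deriving DecidableEq
end

-- children[item] lookup (dict: first match)
def pvChildGet? : PvChildren → Int → Option PvTrie
  | .nil, _ => none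
  | .cons k t rest, x => if x = k then some t else pvChildGet? rest x

-- children[item] = node (dict: overwrite in place, else append in insertion order)
def pvChildSet : PvChildren → Int → PvTrie → PvChildren
  | .nil, x, t' => .cons x t' .nil
  | .cons k t rest, x, t' => if x = k then .cons k t' rest else .cons k t (pvChildSet rest x t')

-- A's inner loop: walk the path, creating missing children, then read is_end (returned Bool)
-- and set it; the updated trie is the first component (path-copying models A's mutation).
def pvWalk : PvTrie → List Int → PvTrie × Bool
  | .mk e c, [] => (.mk true c, e)
  | .mk e c, x :: xs =>
      let child := (pvChildGet? c x).getD (.mk false .nil)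
      let r := pvWalk child xs
      (.mk e (pvChildSet c x r.1), r.2)

-- matrix = [[matrix[j] for j in range(i, i+col)] for i in range(0, len(matrix), col)]
-- (matrix[j] raises outside Pre_; ported totally with pyGetD)
def pvReshape (col : Int) (matrix : List Int) : List (List Int) :=
  (PySem.List.pyRange 0 (matrix.length : Int) col).map (fun i =>
    (PySem.List.pyRange i (i + col) 1).map (fun j => PySem.List.pyGetD matrix j 0))

def uniqueRow (row : Int) (col : Int) (matrix : List Int) : List (List Int) :=
  ((pvReshape col matrix).foldl
    (fun (st : PvTrie × List (List Int)) r =>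
      let w := pvWalk st.1 r
      (w.1, if w.2 then st.2 else st.2 ++ [r]))
    (.mk false .nil, [])).2

-- ===== PORT B =====
def uniqueRow_alt (row : Int) (col : Int) (matrix : List Int) : List (List Int) :=
  ((PySem.List.pyRange 0 (matrix.length : Int) col).foldl
    (fun (st : PySem.Set (List Int) × List (List Int)) i =>
      let r := PySem.List.slice matrix (some i) (some (i + col))
      if PySem.Set.contains st.1 r then st else (PySem.Set.add st.1 r, st.2 ++ [r]))
    (PySem.Set.empty, [])).2

-- ===== PRECONDITION & SPEC =====
-- Pre_ excludes exactly where A raises: col = 0 (range step 0, ValueError) and a positive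
-- col that does not divide len(matrix) (IndexError on the ragged last row).
def Pre_uniqueRow (row : Int) (col : Int) (matrix : List Int) : Prop :=
  col ≠ 0 ∧ (0 < col → col ∣ (matrix.length : Int))
instance (row : Int) (col : Int) (matrix : List Int) : Decidable (Pre_uniqueRow row col matrix) := by unfold Pre_uniqueRow; infer_instance
def pvWitness_uniqueRow : Int × Int × List Int := (2, 2, [1, 0, 1, 0])

def Spec_uniqueRow (row : Int) (col : Int) (matrix : List Int) (out : List (List Int)) : Prop := out = uniqueRow_alt row col matrix
instance (row : Int) (col : Int) (matrix : List Int) (out : List (List Int)) : Decidable (Spec_uniqueRow row col matrix out) := by unfold Spec_uniqueRow; infer_instance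

-- ===== CLAIM (what is proved, stated in full; the proofs are below) =====
def Claim_equal_uniqueRow : Prop := ∀ (row : Int) (col : Int) (matrix : List Int), Dom_uniqueRow row col matrix → Pre_uniqueRow row col matrix → Spec_uniqueRow row col matrix (uniqueRow row col matrix)

-- ===== LEMMAS AND PROOFS =====

-- pure is_end lookup along a path (abstraction of pvWalk's Bool component)
def pvEnded : PvTrie → List Int → Bool
  | .mk e _, [] => e
  | .mk _ c, x :: xs =>
      match pvChildGet? c x with
      | none => false
      | some t => pvEnded t xs

lemma pvChildGet?_set_self : ∀ (c : PvChildren) (x : Int) (t' : PvTrie),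
    pvChildGet? (pvChildSet c x t') x = some t'
  | .nil, x, t' => by simp [pvChildSet, pvChildGet?]
  | .cons k t rest, x, t' => by
      by_cases h : x = k <;>
        simp [pvChildSet, pvChildGet?, h, pvChildGet?_set_self rest x t']

lemma pvChildGet?_set_ne : ∀ (c : PvChildren) (x y : Int) (t' : PvTrie), y ≠ x →
    pvChildGet? (pvChildSet c x t') y = pvChildGet? c y
  | .nil, x, y, t', h => by simp [pvChildSet, pvChildGet?, h]
  | .cons k t rest, x, y, t', h => by
      by_cases hk : x = k
      · subst hk; simp [pvChildSet, pvChildGet?, h]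
      · by_cases hy : y = k <;>
          simp [pvChildSet, pvChildGet?, hk, hy, pvChildGet?_set_ne rest x y t' h]

lemma pvWalk_snd (t : PvTrie) (p : List Int) : (pvWalk t p).2 = pvEnded t p := by
  induction p generalizing t with
  | nil => cases t; simp [pvWalk, pvEnded]
  | cons x xs ih =>
      cases t with
      | mk e c =>
          simp only [pvWalk, pvEnded, ih]
          cases h : pvChildGet? c x with
          | none => simp; cases xs <;> simp [pvEnded, pvChildGet?]
          | some t0 => simp

lemma pvEnded_walk (p : List Int) : ∀ (t : PvTrie) (q : List Int),
    pvEnded (pvWalk t p).1 q = (pvEnded t q || decide (p = q)) := by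
  induction p with
  | nil =>
      intro t q
      cases t with
      | mk e c =>
          cases q with
          | nil => simp [pvWalk, pvEnded]
          | cons y ys => simp [pvWalk, pvEnded]
  | cons x xs ih =>
      intro t q
      cases t with
      | mk e c =>
          cases q with
          | nil => simp [pvWalk, pvEnded]
          | cons y ys =>
              by_cases hy : y = x
              · subst hy
                simp only [pvWalk, pvEnded, pvChildGet?_set_self, ih]
                cases h : pvChildGet? c y with
                | none => simp; cases xs <;> cases ys <;>
                    simp [pvEnded, pvChildGet?]
                | some t0 => simp
              · simp only [pvWalk, pvEnded, pvChildGet?_set_ne _ _ _ _ hy]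
                have hd : decide (x :: xs = y :: ys) = false := by
                  simp
                  exact fun h => ((hy h.symm).elim : xs ≠ ys)
                rw [hd, Bool.or_false]

-- the empty trie has no ended path
lemma pvEnded_empty (q : List Int) : pvEnded (.mk false .nil) q = false := by
  cases q <;> simp [pvEnded, pvChildGet?]

-- A's fold with the trie equals B's fold with the set, given the state correspondence
lemma pvFold_eq (rows : List (List Int)) :
    ∀ (t : PvTrie) (s : PySem.Set (List Int)) (res : List (List Int)),
    (∀ q, pvEnded t q = PySem.Set.contains s q) →
    (rows.foldl (fun (st : PvTrie × List (List Int)) r =>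
        let w := pvWalk st.1 r
        (w.1, if w.2 then st.2 else st.2 ++ [r])) (t, res)).2 =
    (rows.foldl (fun (st : PySem.Set (List Int) × List (List Int)) r =>
        if PySem.Set.contains st.1 r then st else (PySem.Set.add st.1 r, st.2 ++ [r])) (s, res)).2 := by
  induction rows with
  | nil => intro t s res _; rfl
  | cons r rest ih =>
      intro t s res hinv
      simp only [List.foldl_cons]
      have hb : (pvWalk t r).2 = PySem.Set.contains s r := by
        rw [pvWalk_snd]; exact hinv r
      have hiff : (PySem.Set.contains s r = true) ↔ r ∈ s := by
        simp [PySem.Set.contains]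
      by_cases hm : r ∈ s
      · have h : PySem.Set.contains s r = true := hiff.mpr hm
        rw [show (if PySem.Set.contains s r then (s, res) else (PySem.Set.add s r, res ++ [r])) = (s, res) by simp [hm]]
        simp only [hb, h, if_pos]
        apply ih
        intro q
        rw [pvEnded_walk, hinv]
        by_cases hq : r = q
        · subst hq; simp [hm]
        · simp [hq]
      · have h : PySem.Set.contains s r = false := by
          rcases Bool.eq_false_or_eq_true (PySem.Set.contains s r) with h | h
          · exact absurd (hiff.mp h) hm
          · exact h
        rw [show (if PySem.Set.contains s r then (s, res) else (PySem.Set.add s r, res ++ [r])) = (PySem.Set.add s r, res ++ [r]) by simp [hm]]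
        simp only [hb, h, Bool.false_eq_true, if_neg, not_false_eq_true]
        apply ih
        intro q
        rw [pvEnded_walk, hinv]
        by_cases hq : r = q
        · subst hq
          simp [PySem.Set.add, PySem.Set.contains, hm]
        · have hqr : q ≠ r := fun hh => hq hh.symm
          simp [PySem.Set.add, PySem.Set.contains, hm, hq, hqr]

-- a negative step from 0 up to a nonnegative stop gives the empty range
lemma pyRange_neg_nil (n c : Int) (h : c < 0) (hn : 0 ≤ n) :
    PySem.List.pyRange 0 n c = [] := by
  simp only [PySem.List.pyRange, zero_add, sub_zero, zero_sub, ite_eq_left_iff,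
    List.map_eq_nil_iff, List.range_eq_nil]
  intro _
  split_ifs <;> omega

-- A's rebuilt row equals B's slice, for an in-range row start
lemma pvRow_eq_slice (matrix : List Int) (i col : Int) (h0 : 0 ≤ i)
    (hc : 0 < col) (hle : i + col ≤ (matrix.length : Int)) :
    (PySem.List.pyRange i (i + col) 1).map (fun j => PySem.List.pyGetD matrix j 0) =
    PySem.List.slice matrix (some i) (some (i + col)) := by
  have hsplit := PySem.List.pyRange_one_append i (i + col) (matrix.length : Int)
    (by omega) hle
  have hmap := PySem.List.map_pyGetD_pyRange matrix 0 (a := i) h0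
  have hlen' : PySem.List.len matrix = (matrix.length : Int) := by
    simp [pysem]
  rw [hlen'] at hmap
  rw [hsplit, List.map_append] at hmap
  have hlen : ((PySem.List.pyRange i (i + col) 1).map
      (fun j => PySem.List.pyGetD matrix j 0)).length = col.toNat := by
    simp [PySem.List.length_pyRange_one]
  have htake := congrArg (List.take col.toNat) hmap
  rw [← hlen, List.take_left] at htake
  rw [hlen] at htake
  rw [htake, PySem.List.slice_toNat matrix h0 (by omega : (0:Int) ≤ i + col)]
  congr 1
  omega

-- ===== VERDICT (by name: the statement is the Claim_ definition above) =====
theorem uniqueRow_spec : Claim_equal_uniqueRow := by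
  intro row col matrix _ hpre
  obtain ⟨hne, hdvd⟩ := hpre
  unfold Spec_uniqueRow uniqueRow uniqueRow_alt pvReshape
  rcases lt_or_gt_of_ne hne with hneg | hpos
  · rw [pyRange_neg_nil _ _ hneg (by positivity)]
    rfl
  · have hdvd := hdvd hpos
    have hcongr : ((PySem.List.pyRange 0 (matrix.length : Int) col).foldl
        (fun (st : PySem.Set (List Int) × List (List Int)) i =>
          let r := PySem.List.slice matrix (some i) (some (i + col))
          if PySem.Set.contains st.1 r then st else (PySem.Set.add st.1 r, st.2 ++ [r]))
        (PySem.Set.empty, [])) =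
        (((PySem.List.pyRange 0 (matrix.length : Int) col).map
          (fun i => (PySem.List.pyRange i (i + col) 1).map (fun j => PySem.List.pyGetD matrix j 0))).foldl
        (fun (st : PySem.Set (List Int) × List (List Int)) r =>
          if PySem.Set.contains st.1 r then st else (PySem.Set.add st.1 r, st.2 ++ [r]))
        (PySem.Set.empty, [])) := by
      rw [List.foldl_map]
      apply List.foldl_ext
      intro a i hi
      rw [PySem.List.mem_pyRange_iff_of_pos hpos] at hi
      obtain ⟨h0, hlt, hdi⟩ := hi
      rw [sub_zero] at hdi
      have hic : i + col ≤ (matrix.length : Int) := by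
        have hd2 : col ∣ ((matrix.length : Int) - i) := dvd_sub hdvd hdi
        have hpos' : 0 < (matrix.length : Int) - i := by omega
        have := Int.le_of_dvd hpos' hd2
        omega
      rw [pvRow_eq_slice matrix i col h0 hpos hic]
    rw [hcongr]
    exact pvFold_eq ((PySem.List.pyRange 0 (matrix.length : Int) col).map
        (fun i => (PySem.List.pyRange i (i + col) 1).map (fun j => PySem.List.pyGetD matrix j 0)))
        (.mk false .nil) PySem.Set.empty []
        (fun q => by rw [pvEnded_empty]; simp [PySem.Set.contains, PySem.Set.empty])
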